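-- pv_equiv track=rewrite | github.com/gustn6100000-ux/pumsem_rag | pipeline/phase1_preprocessing/step2_table_parser.py | build_composite_headers
-- ===== SOURCE A (Python) =====
-- def build_composite_headers(grid: list[list[str]], n_header_rows: int) -> list[str]:
--     """다중 헤더 행을 합쳐서 단일 헤더 리스트로 만듦"""
--     if n_header_rows == 1:
--         return [h.strip() for h in grid[0]]
--
--     headers = []
--     n_cols = len(grid[0])
--     for c in range(n_cols):
--         parts = []
--         for r in range(n_header_rows):
--             val = grid[r][c].strip() if r < len(grid) and c < len(grid[r]) else ""
--             if val and val not in parts: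
--                 parts.append(val)
--         headers.append("_".join(parts) if len(parts) > 1 else (parts[0] if parts else ""))
--     return headers
-- ===== SOURCE B (Python) =====
-- def build_composite_headers(grid: list[list[str]], n_header_rows: int) -> list[str]:
--     """다중 헤더 행을 합쳐서 단일 헤더 리스트로 만듦"""
--     if n_header_rows == 1:
--         return [h.strip() for h in grid[0]]
--     acc = [[] for _ in range(len(grid[0]))]
--     for row in grid[:n_header_rows]:
--         acc = [_absorb(parts, row[c] if c < len(row) else "")
--                for c, parts in enumerate(acc)]
--     return ["_".join(p) if len(p) > 1 else (p[0] if p else "") for p in acc]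
--
--
-- def _absorb(parts: list[str], raw: str) -> list[str]:
--     v = raw.strip()
--     return parts + [v] if v and v not in parts else parts
-- ===== Notes on version B (the rewrite author's own statement) =====
-- stated objective: alternative
-- what changed: B inverts the traversal: instead of A's column-major double loop that rebuilds each column's parts by indexing grid[r][c], B makes a single row-major pass over the truncated grid, carrying one accumulator list per column and rebuilding the accumulator vector with enumerate on each row, then joins in a final pass.
-- outside the precondition, e.g. on build_composite_headers([], 1): A raises IndexError, B raises IndexError; on build_composite_headers([['a'], ['b']], -1): A returns [''], B returns ['a']
import Mathlib
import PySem

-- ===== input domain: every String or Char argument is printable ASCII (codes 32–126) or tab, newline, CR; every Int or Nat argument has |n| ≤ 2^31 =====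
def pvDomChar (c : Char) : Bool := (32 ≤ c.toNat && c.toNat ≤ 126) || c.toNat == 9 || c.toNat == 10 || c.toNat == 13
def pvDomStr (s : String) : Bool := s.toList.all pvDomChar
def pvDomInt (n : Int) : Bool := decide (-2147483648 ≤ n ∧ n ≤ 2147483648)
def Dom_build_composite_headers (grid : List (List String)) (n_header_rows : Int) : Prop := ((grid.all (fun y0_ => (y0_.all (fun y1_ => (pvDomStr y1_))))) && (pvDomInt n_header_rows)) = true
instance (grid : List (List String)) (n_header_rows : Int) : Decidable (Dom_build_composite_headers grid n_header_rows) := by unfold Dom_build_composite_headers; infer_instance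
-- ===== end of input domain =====

-- B inverts the traversal: one row-major pass over the truncated grid carrying per-column
-- accumulators rebuilt with enumerate, then a final join pass, instead of A's column-major
-- double loop indexing grid[r][c] (objective: alternative; return value only, nothing mutated).

-- ===== PORT A =====
def build_composite_headers (grid : List (List String)) (n_header_rows : Int) : List String :=
  if n_header_rows = 1 then
    (PySem.List.pyGetD grid 0 []).map PySem.Str.strip
  else
    let n_cols : Int := ((PySem.List.pyGetD grid 0 []).length : Int)
    (PySem.List.pyRange 0 n_cols 1).foldl (fun headers c =>
      let parts : List String :=
        (PySem.List.pyRange 0 n_header_rows 1).foldl (fun parts r =>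
          let val : String :=
            if r < (grid.length : Int) ∧ c < ((PySem.List.pyGetD grid r []).length : Int) then
              PySem.Str.strip (PySem.List.pyGetD (PySem.List.pyGetD grid r []) c "")
            else ""
          if val ≠ "" ∧ val ∉ parts then parts ++ [val] else parts) []
      headers ++ [if parts.length > 1 then PySem.Str.join "_" parts else parts.headD ""]) []

-- ===== PORT B =====
-- helper _absorb from Source B
def pvAbsorb (parts : List String) (raw : String) : List String :=
  let v := PySem.Str.strip raw
  if v ≠ "" ∧ v ∉ parts then parts ++ [v] else parts

def build_composite_headers_alt (grid : List (List String)) (n_header_rows : Int) : List String :=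
  if n_header_rows = 1 then
    (PySem.List.pyGetD grid 0 []).map PySem.Str.strip
  else
    let acc0 : List (List String) :=
      List.replicate (PySem.List.pyGetD grid 0 []).length ([] : List String)
    let acc := (PySem.List.slice grid none (some n_header_rows)).foldl (fun acc row =>
      (PySem.List.enumerate acc).map (fun p =>
        pvAbsorb p.2 (if p.1 < (row.length : Int) then PySem.List.pyGetD row p.1 "" else ""))) acc0
    acc.map (fun p => if p.length > 1 then PySem.Str.join "_" p else p.headD "")

-- ===== PRECONDITION & SPEC =====
-- Pre_ excludes the empty grid, where A raises IndexError on grid[0], and negative n_header_rows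
-- selecting a nonempty tail slice (-len < n < 0), where A's range() reads no rows while B's
-- Python slice counts rows from the end of the grid.
def Pre_build_composite_headers (grid : List (List String)) (n_header_rows : Int) : Prop :=
  grid ≠ [] ∧ (0 ≤ n_header_rows ∨ n_header_rows + (grid.length : Int) ≤ 0)
instance (grid : List (List String)) (n_header_rows : Int) : Decidable (Pre_build_composite_headers grid n_header_rows) := by unfold Pre_build_composite_headers; infer_instance
def pvWitness_build_composite_headers : List (List String) × Int := ([[" a ", "b"], ["c"]], 2)

def Spec_build_composite_headers (grid : List (List String)) (n_header_rows : Int) (out : List String) : Prop := out = build_composite_headers_alt grid n_header_rows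
instance (grid : List (List String)) (n_header_rows : Int) (out : List String) : Decidable (Spec_build_composite_headers grid n_header_rows out) := by unfold Spec_build_composite_headers; infer_instance

-- ===== CLAIM =====
def Claim_equal_build_composite_headers : Prop := ∀ (grid : List (List String)) (n_header_rows : Int), Dom_build_composite_headers grid n_header_rows → Pre_build_composite_headers grid n_header_rows → Spec_build_composite_headers grid n_header_rows (build_composite_headers grid n_header_rows)

-- ===== LEMMAS AND PROOFS =====

-- enumerate of an index-dependent map over an enumerate keeps the indices
lemma enumerate_map_enum {α α' : Type} (h : Int → α → α') :
    ∀ (l : List α) (s : Int),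
      PySem.List.enumerate ((PySem.List.enumerate l s).map (fun p => h p.1 p.2)) s
        = (PySem.List.enumerate l s).map (fun p => (p.1, h p.1 p.2)) := by
  intro l
  induction l with
  | nil => intro s; simp [PySem.List.enumerate_nil]
  | cons x xs ih => intro s; simp [PySem.List.enumerate_cons, ih]

-- B's row-major fold of enumerate-rebuilt accumulators is the per-column fold
lemma foldl_enum {α β : Type} (step : Int → α → β → α) :
    ∀ (rows : List β) (s : Int) (acc : List α),
      rows.foldl (fun acc row =>
          (PySem.List.enumerate acc s).map (fun p => step p.1 p.2 row)) acc
        = (PySem.List.enumerate acc s).map (fun p => rows.foldl (step p.1) p.2) := by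
  intro rows
  induction rows with
  | nil => intro s acc; simp
  | cons row rows ih =>
      intro s acc
      rw [List.foldl_cons, ih, enumerate_map_enum (fun i a => step i a row), List.map_map]
      simp [Function.comp]

-- reading positions 0..m-1 of a list with a default is take-then-pad
lemma map_range_getD {α : Type} (d : α) :
    ∀ (xs : List α) (m : Nat),
      (List.range m).map (fun k => xs.getD k d)
        = xs.take m ++ List.replicate (m - xs.length) d := by
  intro xs
  induction xs with
  | nil => intro m; simp [List.map_const']
  | cons x xs ih =>
      intro m
      cases m with
      | zero => simp
      | succ m =>
          rw [List.range_succ_eq_map]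
          simp only [List.map_cons, List.map_map]
          have h1 : (List.range m).map ((fun k => (x :: xs).getD k d) ∘ Nat.succ)
              = (List.range m).map (fun k => xs.getD k d) := by
            refine List.map_congr_left ?_
            intro r _
            simp [Function.comp]
          rw [h1, ih m]
          simp [Nat.succ_sub_succ]

-- folding a step that ignores d over replicate d is the identity
lemma foldl_replicate_id {α β : Type} (g : α → β → α) (d : β) (hg : ∀ a, g a d = a) :
    ∀ (k : Nat) (init : α), (List.replicate k d).foldl g init = init := by
  intro k
  induction k with
  | zero => intro init; rfl
  | succ k ih => intro init; rw [List.replicate_succ, List.foldl_cons, hg]; exact ih init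

lemma strip_empty : PySem.Str.strip "" = "" := rfl

lemma absorb_empty (parts : List String) : pvAbsorb parts "" = parts := by
  simp [pvAbsorb, strip_empty]

theorem build_composite_headers_spec : Claim_equal_build_composite_headers := by
  intro grid n hdom hpre
  obtain ⟨hne, hn⟩ := hpre
  unfold Spec_build_composite_headers build_composite_headers build_composite_headers_alt
  by_cases h1 : n = 1
  · simp [h1]
  rcases hn with hn0 | hneg
  · simp only [if_neg h1]
    rw [PySem.List.foldl_append_singleton_eq_map, List.nil_append]
    -- rewrite B's accumulator fold per column
    rw [PySem.List.slice_to grid hn0]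
    rw [foldl_enum (fun c parts row =>
          pvAbsorb parts (if c < (row.length : Int) then PySem.List.pyGetD row c "" else ""))
        (grid.take n.toNat) 0
        (List.replicate (PySem.List.pyGetD grid 0 []).length ([] : List String))]
    -- enumerate of the replicate initial vector is an indexed range
    rw [PySem.List.enumerate_eq_map_pyRange (List.replicate (PySem.List.pyGetD grid 0 []).length ([] : List String)) ([] : List String), List.map_map, List.map_map]
    simp only [PySem.List.len_eq, List.length_replicate]
    refine List.map_congr_left ?_
    intro c hc
    obtain ⟨hc0, hcn⟩ := PySem.List.mem_pyRange_one.mp hc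
    simp only [Function.comp]
    -- the initial accumulator at column c is []
    have hinit : PySem.List.pyGetD (List.replicate (PySem.List.pyGetD grid 0 []).length ([] : List String)) c [] = ([] : List String) := by
      obtain ⟨k, rfl⟩ := Int.eq_ofNat_of_zero_le hc0
      rw [PySem.List.pyGetD_natCast]
      cases Nat.lt_or_ge k (PySem.List.pyGetD grid 0 []).length with
      | inl h => rw [List.getD_eq_getElem _ _ (by simpa using h)]; simp
      | inr h => rw [List.getD_eq_default _ _ (by simpa using h)]
    rw [hinit]
    -- A's inner fold: each step is pvAbsorb of the guarded cell of row grid[r]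
    have hstep :
        (PySem.List.pyRange 0 n 1).foldl (fun parts r =>
          let val : String :=
            if r < (grid.length : Int) ∧ c < ((PySem.List.pyGetD grid r []).length : Int) then
              PySem.Str.strip (PySem.List.pyGetD (PySem.List.pyGetD grid r []) c "")
            else ""
          if val ≠ "" ∧ val ∉ parts then parts ++ [val] else parts) []
        = (PySem.List.pyRange 0 n 1).foldl (fun parts r =>
            pvAbsorb parts
              (if c < ((PySem.List.pyGetD grid r []).length : Int) then
                 PySem.List.pyGetD (PySem.List.pyGetD grid r []) c ""
               else "")) [] := by
      refine PySem.List.foldl_congr_mem _ _ _ _ ?_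
      intro parts r hr
      obtain ⟨hr0, _⟩ := PySem.List.mem_pyRange_one.mp hr
      by_cases hlt : r < (grid.length : Int)
      · simp only [hlt, true_and, pvAbsorb]
        by_cases hcl : c < ((PySem.List.pyGetD grid r []).length : Int)
        · simp [hcl]
        · simp [hcl, strip_empty]
      · -- r out of range: pyGetD grid r [] = [], both sides keep parts
        have hrow : PySem.List.pyGetD grid r [] = ([] : List String) := by
          obtain ⟨k, rfl⟩ := Int.eq_ofNat_of_zero_le hr0
          rw [PySem.List.pyGetD_natCast]
          have hk : grid.length ≤ k := by exact_mod_cast Int.not_lt.mp hlt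
          exact List.getD_eq_default _ _ hk
        have hcl : ¬ c < ((PySem.List.pyGetD grid r []).length : Int) := by
          rw [hrow]; simp; omega
        simp only [hlt, false_and, if_neg (fun h : (False : Prop) => h.elim)]
        simp [hcl, pvAbsorb, strip_empty]
    rw [hstep]
    -- turn A's index fold into a fold over the rows themselves
    have hfm :
        (PySem.List.pyRange 0 n 1).foldl (fun parts r =>
            pvAbsorb parts
              (if c < ((PySem.List.pyGetD grid r []).length : Int) then
                 PySem.List.pyGetD (PySem.List.pyGetD grid r []) c ""
               else "")) []
        = ((PySem.List.pyRange 0 n 1).map (fun r => PySem.List.pyGetD grid r [])).foldl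
            (fun parts row =>
              pvAbsorb parts
                (if c < ((row : List String).length : Int) then PySem.List.pyGetD row c "" else "")) [] := by
      rw [List.foldl_map]
    rw [hfm, PySem.List.pyRange_zero, List.map_map]
    have hrows : (List.range n.toNat).map ((fun r => PySem.List.pyGetD grid r []) ∘ (fun k : Nat => (k : Int)))
        = grid.take n.toNat ++ List.replicate (n.toNat - grid.length) ([] : List String) := by
      rw [← map_range_getD ([] : List String) grid n.toNat]
      refine List.map_congr_left ?_
      intro k _
      simp [Function.comp]
    rw [hrows, List.foldl_append]
    have hnil : ¬ c < ((([] : List String)).length : Int) := by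
      simp only [List.length_nil, Nat.cast_zero]; omega
    rw [foldl_replicate_id _ ([] : List String)
        (fun a => by rw [if_neg hnil]; exact absorb_empty a)]
  · -- n + len ≤ 0 (and n ≠ 1): A reads no rows and B's slice is empty; both all-blank headers
    have hlen : (0:Int) < (grid.length : Int) := by
      cases grid with
      | nil => exact absurd rfl hne
      | cons x xs => exact_mod_cast Nat.succ_pos xs.length
    have hn0' : n < 0 := by omega
    have hr : PySem.List.pyRange 0 n 1 = [] := by
      rw [PySem.List.pyRange_one]; simp; omega
    have hk : n = -(((-n).toNat : Nat) : Int) := by omega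
    have hsl : PySem.List.slice grid none (some n) = [] := by
      rw [hk, PySem.List.slice_to_neg_natCast grid (-n).toNat (by omega)]
      have h0 : grid.length - (-n).toNat = 0 := by omega
      rw [h0, List.take_zero]
    simp only [if_neg h1, hr, hsl, List.foldl_nil]
    rw [PySem.List.foldl_append_singleton_eq_map, List.nil_append]
    simp [List.map_const']
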